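-- pv_equiv track=rewrite | github.com/AI4WA/Docs2Synth | docs2synth/retriever/preprocess.py | _create_word_labels
-- ===== SOURCE A (Python) =====
-- from typing import Any, Dict, List, Optional
--
-- def _create_word_labels(
--     doc_words: List[str], answer: str
-- ) -> Optional[List[int]]:
--     """Create word-level labels for answer span detection.
--
--     Args:
--         doc_words: List of document words
--         answer: Answer string to find
--
--     Returns:
--         List of labels (0=normal, 1=start, 2=end), or None if answer not found
--     """
--     if not answer or not answer.strip():
--         # Empty answer
--         return None
--
--     answer_words = answer.strip().split()
--     if not answer_words:
--         return None
--
--     # Try to find answer words in document words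
--     answer_len = len(answer_words)
--
--     for i in range(len(doc_words) - answer_len + 1):
--         # Check if this is a match (case-insensitive)
--         match = True
--         for j, ans_word in enumerate(answer_words):
--             if doc_words[i + j].lower() != ans_word.lower():
--                 match = False
--                 break
--
--         if match:
--             # Found answer! Create labels
--             labels = [0] * len(doc_words)
--             labels[i] = 1  # Start token
--             labels[i + answer_len - 1] = 2  # End token
--             return labels
--
--     # Try fuzzy matching: find substring matches
--     answer_text_lower = answer.lower().replace(" ", "")
--     for i, word in enumerate(doc_words):
--         word_lower = word.lower().replace(" ", "")
--         if answer_text_lower in word_lower or word_lower in answer_text_lower: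
--             # Single word match
--             labels = [0] * len(doc_words)
--             labels[i] = 1  # Start
--             labels[i] = 2  # End (same position for single word)
--             return labels
--
--     # Answer not found
--     return None
-- ===== SOURCE B (Python) =====
-- def _create_word_labels(doc_words, answer):
--     """Re-implementation: lowercase everything once, index document positions by
--     word so the exact search only probes positions holding the answer's first
--     word (slice comparison instead of an inner char-by-char word loop)."""
--     answer_words = answer.strip().split()
--     if not answer_words:
--         return None
--
--     n = len(doc_words)
--     m = len(answer_words)
--     doc_lower = [w.lower() for w in doc_words]
--     ans_lower = [w.lower() for w in answer_words]
--
--     # index: lowered word -> positions where it occurs (in increasing order)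
--     positions = {}
--     for idx, w in enumerate(doc_lower):
--         positions.setdefault(w, []).append(idx)
--
--     start = end = None
--     for i in positions.get(ans_lower[0], []):
--         if i + m <= n and doc_lower[i:i + m] == ans_lower:
--             start, end = i, i + m - 1
--             break
--
--     if start is None:
--         # fuzzy fallback: substring containment either way, first hit
--         ans_compact = answer.lower().replace(" ", "")
--         for i, w in enumerate(doc_lower):
--             wc = w.replace(" ", "")
--             if ans_compact in wc or wc in ans_compact:
--                 start = end = i
--                 break
--         else:
--             return None
--
--     labels = [0] * n
--     labels[start] = 1
--     labels[end] = 2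
--     return labels
-- ===== Notes on version B (the rewrite author's own statement) =====
-- stated objective: alternative
-- what changed: B lowercases document and answer once up front, builds a word->positions index of the document and checks only positions of the answer's first word with a whole-slice comparison, instead of A's nested scan that re-lowercases both words inside an inner flag-and-break loop; the empty-answer guards collapse into one strip().split() test.
import Mathlib
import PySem

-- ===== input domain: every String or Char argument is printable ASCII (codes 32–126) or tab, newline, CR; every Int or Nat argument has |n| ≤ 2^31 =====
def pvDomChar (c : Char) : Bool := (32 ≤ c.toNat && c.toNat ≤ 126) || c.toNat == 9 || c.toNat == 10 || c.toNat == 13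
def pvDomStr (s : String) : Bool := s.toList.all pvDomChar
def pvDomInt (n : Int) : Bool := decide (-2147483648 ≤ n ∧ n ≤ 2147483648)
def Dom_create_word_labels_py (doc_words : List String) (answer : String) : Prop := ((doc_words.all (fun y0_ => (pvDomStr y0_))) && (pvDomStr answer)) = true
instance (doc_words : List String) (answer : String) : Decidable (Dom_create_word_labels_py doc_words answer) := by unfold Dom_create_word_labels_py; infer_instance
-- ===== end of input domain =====

-- B lowercases once and probes only the indexed positions of the answer's first word
-- (slice comparison) instead of A's nested re-lowercasing scan; an alternative with the
-- same worst-case cost. The return values are proved equal on all inputs.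

-- ===== PORT A =====
-- Python list assignment xs[i] = v; exact for 0 ≤ i < len xs (the only way both ports use it)
def pySetIdx (xs : List Int) (i : Int) (v : Int) : List Int := xs.set i.toNat v

-- inner j-loop of A (flag + break = all of the enumerated answer words);
-- pyGetD is exact here: A only calls it with 0 ≤ i + j < len doc_words
def aMatchAt (doc_words : List String) (answer_words : List String) (i : Int) : Bool :=
  (PySem.List.enumerate answer_words).all (fun p =>
    PySem.Str.lower (PySem.List.pyGetD doc_words (i + p.1) "") == PySem.Str.lower p.2)

def create_word_labels_py (doc_words : List String) (answer : String) : Option (List Int) :=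
  if PySem.Str.len answer == 0 || PySem.Str.len (PySem.Str.strip answer) == 0 then
    none
  else
    let answer_words := PySem.Str.split₀ (PySem.Str.strip answer)
    if answer_words.isEmpty then none
    else
      let answer_len : Int := answer_words.length
      let n : Int := doc_words.length
      match (PySem.List.pyRange 0 (n - answer_len + 1)).find? (aMatchAt doc_words answer_words) with
      | some i =>
          some (pySetIdx (pySetIdx (List.replicate doc_words.length 0) i 1) (i + answer_len - 1) 2)
      | none =>
          let answer_text_lower := PySem.Str.replace (PySem.Str.lower answer) " " ""
          match (PySem.List.enumerate doc_words).find? (fun p =>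
              let word_lower := PySem.Str.replace (PySem.Str.lower p.2) " " ""
              PySem.Str.isIn answer_text_lower word_lower || PySem.Str.isIn word_lower answer_text_lower) with
          | some p => some (pySetIdx (pySetIdx (List.replicate doc_words.length 0) p.1 1) p.1 2)
          | none => none

-- ===== PORT B =====
-- positions.setdefault(w, []).append(idx) over enumerate(doc_lower)
def bPositions (doc_lower : List String) : PySem.Dict String (List Int) :=
  (PySem.List.enumerate doc_lower).foldl
    (fun d p => d.modify p.2 [] (fun ps => ps ++ [p.1])) PySem.Dict.empty

def create_word_labels_py_alt (doc_words : List String) (answer : String) : Option (List Int) :=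
  let answer_words := PySem.Str.split₀ (PySem.Str.strip answer)
  match answer_words with
  | [] => none
  | aw0 :: _ =>
    let n : Int := doc_words.length
    let m : Int := answer_words.length
    let doc_lower := doc_words.map PySem.Str.lower
    let ans_lower := answer_words.map PySem.Str.lower
    let positions := bPositions doc_lower
    let exact := (positions.getD (PySem.Str.lower aw0) []).find? (fun i =>
        decide (i + m ≤ n) && (PySem.List.slice doc_lower (some i) (some (i + m)) == ans_lower))
    let se : Option (Int × Int) :=
      match exact with
      | some i => some (i, i + m - 1)
      | none =>
          let ans_compact := PySem.Str.replace (PySem.Str.lower answer) " " ""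
          match (PySem.List.enumerate doc_lower).find? (fun p =>
              let wc := PySem.Str.replace p.2 " " ""
              PySem.Str.isIn ans_compact wc || PySem.Str.isIn wc ans_compact) with
          | some p => some (p.1, p.1)
          | none => none
    match se with
    | some (s, e) => some (pySetIdx (pySetIdx (List.replicate doc_words.length 0) s 1) e 2)
    | none => none

-- ===== PRECONDITION & SPEC =====
def Spec_create_word_labels_py (doc_words : List String) (answer : String) (out : Option (List Int)) : Prop := out = create_word_labels_py_alt doc_words answer
instance (doc_words : List String) (answer : String) (out : Option (List Int)) : Decidable (Spec_create_word_labels_py doc_words answer out) := by unfold Spec_create_word_labels_py; infer_instance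

-- ===== CLAIM (what is proved, stated in full; the proofs are below) =====
def Claim_equal_create_word_labels_py : Prop := ∀ (doc_words : List String) (answer : String), Dom_create_word_labels_py doc_words answer → Spec_create_word_labels_py doc_words answer (create_word_labels_py doc_words answer)

-- ===== LEMMAS AND PROOFS =====

theorem split_strip_nil_of_guard (ans : String)
    (h : (PySem.Str.len ans == 0 || PySem.Str.len (PySem.Str.strip ans) == 0) = true) :
    PySem.Str.split₀ (PySem.Str.strip ans) = [] := by
  have hnil : (PySem.Str.strip ans).toList = [] := by
    rcases Bool.or_eq_true_iff.mp h with h' | h'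
    · have : ans.toList = [] := by
        have := PySem.Str.len_eq ans
        simp only [beq_iff_eq, this] at h'
        exact List.eq_nil_of_length_eq_zero (by exact_mod_cast h')
      rw [PySem.Str.toList_strip, this]
      rfl
    · have := PySem.Str.len_eq (PySem.Str.strip ans)
      simp only [beq_iff_eq, this] at h'
      exact List.eq_nil_of_length_eq_zero (by exact_mod_cast h')
  rw [PySem.Str.split₀, hnil]
  rfl

theorem aMatch_iff (dw ws : List String) (t : Nat)
    (hjm : t + ws.length ≤ dw.length) :
    aMatchAt dw ws (t : Int) = true ↔
      ∀ (k : Nat) (hk : k < ws.length),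
        PySem.Str.lower (dw[t + k]'(by omega)) = PySem.Str.lower (ws[k]) := by
  unfold aMatchAt
  rw [List.all_eq_true]
  constructor
  · intro h k hk
    have hm := h _ ((PySem.List.mem_enumerate_iff _ _ _).mpr ⟨k, hk, rfl⟩)
    simp only [beq_iff_eq] at hm
    rw [PySem.List.pyGetD_eq_getElem dw "" (by omega) (by omega)] at hm
    convert hm using 3
    omega
  · intro h p hp
    obtain ⟨k, hk, rfl⟩ := (PySem.List.mem_enumerate_iff _ _ _).mp hp
    simp only [beq_iff_eq]
    rw [PySem.List.pyGetD_eq_getElem dw "" (by omega) (by omega)]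
    rw [show dw[((t:Int) + (0 + (k:Int))).toNat]'(by omega) = dw[t + k]'(by omega) by
      congr 1; omega]
    exact h k hk

theorem slice_iff (dw ws : List String) (t : Nat)
    (hjm : t + ws.length ≤ dw.length) :
    (PySem.List.slice (dw.map PySem.Str.lower) (some (t : Int)) (some ((t : Int) + (ws.length : Int))) ==
        ws.map PySem.Str.lower) = true ↔
      ∀ (k : Nat) (hk : k < ws.length),
        PySem.Str.lower (dw[t + k]'(by omega)) = PySem.Str.lower (ws[k]) := by
  rw [show (t : Int) + (ws.length : Int) = ((t + ws.length : Nat) : Int) by push_cast; ring]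
  rw [PySem.List.slice_natCast, beq_iff_eq]
  have hlen : (List.take (t + ws.length - t) (List.drop t (dw.map PySem.Str.lower))).length = ws.length := by
    simp; omega
  constructor
  · intro h k hk
    obtain ⟨-, hg⟩ := List.ext_getElem_iff.mp h
    have hk2 : k < (List.take (t + ws.length - t) (List.drop t (dw.map PySem.Str.lower))).length := by omega
    have := hg k hk2 (by simpa using hk)
    rw [List.getElem_take, List.getElem_drop] at this
    simpa using this
  · intro h
    apply List.ext_getElem (by simpa using hlen)
    intro k hk1 hk2
    rw [List.getElem_take, List.getElem_drop]
    simpa using h k (by simpa using hk2)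

theorem aMatch_first (dw : List String) (w0 : String) (rest : List String) (j : Int)
    (h : aMatchAt dw (w0 :: rest) j = true) :
    (PySem.List.pyGetD (dw.map PySem.Str.lower) j "" == PySem.Str.lower w0) = true := by
  unfold aMatchAt at h
  rw [List.all_eq_true] at h
  have h0 := h (0, w0) (by rw [PySem.List.enumerate_cons]; simp)
  simp only [beq_iff_eq] at h0 ⊢
  have := PySem.List.pyGetD_map PySem.Str.lower dw j ""
  rw [show PySem.Str.lower "" = "" from rfl] at this
  rw [this]
  simpa using h0

theorem getD_posfold (l : List (Int × String)) (d : PySem.Dict String (List Int)) (w : String) :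
    (l.foldl (fun d p => d.modify p.2 [] (fun ps => ps ++ [p.1])) d).getD w [] =
      d.getD w [] ++ (l.filter (fun p => p.2 == w)).map (fun p => p.1) := by
  induction l generalizing d with
  | nil => simp
  | cons x t ih =>
    rw [List.foldl_cons, ih, PySem.Dict.getD_modify, List.filter_cons]
    by_cases hw : x.2 = w
    · simp [hw]
    · simp [hw, Ne.symm hw]

theorem bPositions_getD (dl : List String) (w : String) :
    (bPositions dl).getD w [] =
      ((PySem.List.enumerate dl).filter (fun p => p.2 == w)).map (fun p => p.1) := by
  rw [bPositions, getD_posfold]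
  simp

theorem find?_filter_comm {α : Type} (p q : α → Bool) (l : List α) :
    (l.filter p).find? q = l.find? (fun x => p x && q x) := by
  induction l with
  | nil => rfl
  | cons x t ih =>
    by_cases hp : p x = true
    · by_cases hq : q x = true <;> simp [hp, hq, ih]
    · simp [hp, ih]

theorem find?_congr_mem {α : Type} {p q : α → Bool} {l : List α}
    (h : ∀ x ∈ l, p x = q x) : l.find? p = l.find? q := by
  induction l with
  | nil => rfl
  | cons x t ih =>
    have hx := h x (by simp)
    rw [List.find?_cons, List.find?_cons, hx, ih (fun y hy => h y (by simp [hy]))]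


theorem pred_eq_point (dw : List String) (w0 : String) (rest : List String) (j : Int)
    (h0 : 0 ≤ j) :
    ((PySem.List.pyGetD (dw.map PySem.Str.lower) j "" == PySem.Str.lower w0) &&
        (decide (j + (((w0 :: rest).length : Nat) : Int) ≤ ((dw.length : Nat) : Int)) &&
          (PySem.List.slice (dw.map PySem.Str.lower) (some j)
              (some (j + (((w0 :: rest).length : Nat) : Int))) ==
            (w0 :: rest).map PySem.Str.lower))) =
      (decide (j + (((w0 :: rest).length : Nat) : Int) ≤ ((dw.length : Nat) : Int)) &&
        aMatchAt dw (w0 :: rest) j) := by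
  by_cases hd : j + (((w0 :: rest).length : Nat) : Int) ≤ ((dw.length : Nat) : Int)
  · obtain ⟨t, rfl⟩ : ∃ t : Nat, j = (t : Int) := ⟨j.toNat, by omega⟩
    have hjm : t + (w0 :: rest).length ≤ dw.length := by exact_mod_cast hd
    have hs : (PySem.List.slice (dw.map PySem.Str.lower) (some (t : Int))
          (some ((t : Int) + (((w0 :: rest).length : Nat) : Int))) ==
        (w0 :: rest).map PySem.Str.lower) = aMatchAt dw (w0 :: rest) (t : Int) := by
      rw [Bool.eq_iff_iff, slice_iff dw (w0 :: rest) t hjm, aMatch_iff dw (w0 :: rest) t hjm]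
    rw [hs]
    cases haM : aMatchAt dw (w0 :: rest) (t : Int) with
    | true => rw [aMatch_first dw w0 rest _ haM]; simp
    | false => simp
  · have hd' : decide (j + (((w0 :: rest).length : Nat) : Int) ≤ ((dw.length : Nat) : Int)) = false := by
      simpa using hd
    rw [hd']
    simp

theorem search_eq (dw : List String) (w0 : String) (rest : List String) :
    ((bPositions (dw.map PySem.Str.lower)).getD (PySem.Str.lower w0) []).find? (fun i =>
        decide (i + (((w0 :: rest).length : Nat) : Int) ≤ ((dw.length : Nat) : Int)) &&
          (PySem.List.slice (dw.map PySem.Str.lower) (some i)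
              (some (i + (((w0 :: rest).length : Nat) : Int))) ==
            (w0 :: rest).map PySem.Str.lower)) =
      (PySem.List.pyRange 0 (((dw.length : Nat) : Int) - (((w0 :: rest).length : Nat) : Int) + 1)).find?
        (aMatchAt dw (w0 :: rest)) := by
  rw [bPositions_getD, List.find?_map, find?_filter_comm,
      PySem.List.enumerate_eq_map_pyRange _ "", List.find?_map, Option.map_map]
  simp only [Function.comp_def, Option.map_id']
  have hlen : PySem.List.len (dw.map PySem.Str.lower) = ((dw.length : Nat) : Int) := by
    simp [PySem.List.len]
  rw [hlen]
  rw [find?_congr_mem (q := fun j =>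
      decide (j + (((w0 :: rest).length : Nat) : Int) ≤ ((dw.length : Nat) : Int)) &&
        aMatchAt dw (w0 :: rest) j)
    (fun j hj => pred_eq_point dw w0 rest j ((PySem.List.mem_pyRange_one.mp hj).1))]
  by_cases hc : ((dw.length : Nat) : Int) - (((w0 :: rest).length : Nat) : Int) + 1 ≤ 0
  · rw [PySem.List.pyRange_one_eq_nil hc, List.find?_nil]
    rw [List.find?_eq_none]
    intro j hj
    have := PySem.List.mem_pyRange_one.mp hj
    rw [decide_eq_false (show ¬ (j + (((w0 :: rest).length : Nat) : Int) ≤ ((dw.length : Nat) : Int)) by omega), Bool.false_and]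
    simp
  · have h0m : (0:Int) ≤ ((dw.length : Nat) : Int) - (((w0 :: rest).length : Nat) : Int) + 1 := by omega
    have hmn : ((dw.length : Nat) : Int) - (((w0 :: rest).length : Nat) : Int) + 1 ≤ ((dw.length : Nat) : Int) := by
      have : 1 ≤ (w0 :: rest).length := by simp
      omega
    rw [PySem.List.pyRange_one_append 0
        (((dw.length : Nat) : Int) - (((w0 :: rest).length : Nat) : Int) + 1)
        ((dw.length : Nat) : Int) h0m hmn, List.find?_append]
    have h2 : (PySem.List.pyRange
        (((dw.length : Nat) : Int) - (((w0 :: rest).length : Nat) : Int) + 1)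
        ((dw.length : Nat) : Int)).find? (fun j =>
          decide (j + (((w0 :: rest).length : Nat) : Int) ≤ ((dw.length : Nat) : Int)) &&
            aMatchAt dw (w0 :: rest) j) = none := by
      rw [List.find?_eq_none]
      intro j hj
      have := PySem.List.mem_pyRange_one.mp hj
      rw [decide_eq_false (show ¬ (j + (((w0 :: rest).length : Nat) : Int) ≤ ((dw.length : Nat) : Int)) by omega), Bool.false_and]
      simp
    rw [h2, Option.or_none]
    apply find?_congr_mem
    intro j hj
    have := PySem.List.mem_pyRange_one.mp hj
    rw [decide_eq_true (show j + (((w0 :: rest).length : Nat) : Int) ≤ ((dw.length : Nat) : Int) by omega), Bool.true_and]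

theorem enumerate_map {α β : Type} (f : α → β) (xs : List α) (s : Int) :
    PySem.List.enumerate (xs.map f) s = (PySem.List.enumerate xs s).map (fun p => (p.1, f p.2)) := by
  induction xs generalizing s with
  | nil => rfl
  | cons x t ih => simp [PySem.List.enumerate_cons, ih]

theorem main_equiv (doc_words : List String) (answer : String) :
    create_word_labels_py doc_words answer = create_word_labels_py_alt doc_words answer := by
  unfold create_word_labels_py create_word_labels_py_alt
  by_cases h1 : (PySem.Str.len answer == 0 || PySem.Str.len (PySem.Str.strip answer) == 0) = true
  · rw [if_pos h1, split_strip_nil_of_guard answer h1]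
  · rw [if_neg h1]
    cases hws : PySem.Str.split₀ (PySem.Str.strip answer) with
    | nil => simp
    | cons w0 rest =>
      simp only [List.isEmpty_cons, Bool.false_eq_true]
      rw [search_eq doc_words w0 rest]
      cases hE : (PySem.List.pyRange 0 (((doc_words.length : Nat) : Int) - (((w0 :: rest).length : Nat) : Int) + 1)).find? (aMatchAt doc_words (w0 :: rest)) with
      | some i => rfl
      | none =>
        rw [enumerate_map PySem.Str.lower doc_words 0, List.find?_map]
        simp only [Function.comp_def]
        cases hF : (PySem.List.enumerate doc_words).find? (fun p =>
            PySem.Str.isIn (PySem.Str.replace (PySem.Str.lower answer) " " "")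
                (PySem.Str.replace (PySem.Str.lower p.2) " " "") ||
              PySem.Str.isIn (PySem.Str.replace (PySem.Str.lower p.2) " " "")
                (PySem.Str.replace (PySem.Str.lower answer) " " "")) with
        | some p => rfl
        | none => rfl

-- ===== VERDICT (by name: the statement is the Claim_ definition above) =====
theorem create_word_labels_py_spec : Claim_equal_create_word_labels_py := by
  intro doc_words answer _
  unfold Spec_create_word_labels_py
  exact main_equiv doc_words answer
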